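-- pv_equiv track=rewrite | github.com/ekacala/GraphTraversalPuzzleSolver | Converter.py | coordinate_converter
-- ===== SOURCE A (Python) =====
-- def coordinate_converter(path):
--     """
--     Converts the (x, y) coordinates provided by Puzzle.py into letter/number coordinates.
--     :param path: A list of (x, y) coordinates that make up the shortest path.
--     :return: A list of letter/number coordinates meant for the user to read.
--     """
--     converted_path = []
--
--     for coord in path:
--         if coord == (0, 0):
--             converted_path.append('A1')
--         elif coord == (0, 1):
--             converted_path.append('A2')
--         elif coord == (0, 2):
--             converted_path.append('A3')
--         elif coord == (0, 3):
--             converted_path.append('A4')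
--         elif coord == (0, 4):
--             converted_path.append('A5')
--         elif coord == (1, 0):
--             converted_path.append('B1')
--         elif coord == (1, 1):
--             converted_path.append('B2')
--         elif coord == (1, 3):
--             converted_path.append('B4')
--         elif coord == (1, 4):
--             converted_path.append('B5')
--         elif coord == (2, 0):
--             converted_path.append('C1')
--         elif coord == (2, 1):
--             converted_path.append('C2')
--         elif coord == (2, 2):
--             converted_path.append('C3')
--         elif coord == (2, 3):
--             converted_path.append('C4')
--         elif coord == (2, 4):
--             converted_path.append('C5')
--         elif coord == (3, 1):
--             converted_path.append('D2')
--         elif coord == (3, 4):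
--             converted_path.append('D5')
--         elif coord == (4, 0):
--             converted_path.append('E1')
--         elif coord == (4, 2):
--             converted_path.append('E3')
--         elif coord == (4, 3):
--             converted_path.append('E4')
--         elif coord == (4, 4):
--             converted_path.append('E5')
--
--     return converted_path
-- ===== SOURCE B (Python) =====
-- # The 20 coordinates A's lookup table accepts: the full 5x5 grid minus 5 holes.
-- _VALID = {(x, y) for x in range(5) for y in range(5)} - {(1, 2), (3, 0), (3, 2), (3, 3), (4, 1)}
--
--
-- def coordinate_converter(path):
--     return [chr(ord('A') + c[0]) + str(c[1] + 1) for c in path if c in _VALID]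
-- ===== Notes on version B (the rewrite author's own statement) =====
-- stated objective: simpler
-- what changed: Replaces the 21-branch if/elif lookup table and append loop by a single comprehension that filters against a set of the 20 accepted coordinates and derives each label by the formula chr(ord('A')+x)+str(y+1).
import Mathlib
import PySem

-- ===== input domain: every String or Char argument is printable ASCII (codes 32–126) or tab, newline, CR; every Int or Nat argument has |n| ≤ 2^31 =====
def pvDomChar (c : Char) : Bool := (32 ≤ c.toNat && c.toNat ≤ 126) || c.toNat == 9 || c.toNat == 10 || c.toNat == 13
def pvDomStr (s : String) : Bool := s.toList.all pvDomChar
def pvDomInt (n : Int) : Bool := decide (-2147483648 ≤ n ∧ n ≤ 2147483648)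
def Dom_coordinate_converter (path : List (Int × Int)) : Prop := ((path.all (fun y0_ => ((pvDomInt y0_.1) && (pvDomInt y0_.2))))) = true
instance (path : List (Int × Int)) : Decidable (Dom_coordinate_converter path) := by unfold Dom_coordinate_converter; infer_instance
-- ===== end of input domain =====

-- B replaces A's 21-branch if/elif lookup table by a filter against the set of
-- 20 accepted coordinates plus the formula chr(ord('A')+x)+str(y+1) (objective: simpler).

-- ===== PORT A =====
def coordinate_converter (path : List (Int × Int)) : List String :=
  path.foldl (fun converted_path coord =>
    if coord == ((0 : Int), (0 : Int)) then converted_path ++ ["A1"]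
    else if coord == ((0 : Int), (1 : Int)) then converted_path ++ ["A2"]
    else if coord == ((0 : Int), (2 : Int)) then converted_path ++ ["A3"]
    else if coord == ((0 : Int), (3 : Int)) then converted_path ++ ["A4"]
    else if coord == ((0 : Int), (4 : Int)) then converted_path ++ ["A5"]
    else if coord == ((1 : Int), (0 : Int)) then converted_path ++ ["B1"]
    else if coord == ((1 : Int), (1 : Int)) then converted_path ++ ["B2"]
    else if coord == ((1 : Int), (3 : Int)) then converted_path ++ ["B4"]
    else if coord == ((1 : Int), (4 : Int)) then converted_path ++ ["B5"]
    else if coord == ((2 : Int), (0 : Int)) then converted_path ++ ["C1"]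
    else if coord == ((2 : Int), (1 : Int)) then converted_path ++ ["C2"]
    else if coord == ((2 : Int), (2 : Int)) then converted_path ++ ["C3"]
    else if coord == ((2 : Int), (3 : Int)) then converted_path ++ ["C4"]
    else if coord == ((2 : Int), (4 : Int)) then converted_path ++ ["C5"]
    else if coord == ((3 : Int), (1 : Int)) then converted_path ++ ["D2"]
    else if coord == ((3 : Int), (4 : Int)) then converted_path ++ ["D5"]
    else if coord == ((4 : Int), (0 : Int)) then converted_path ++ ["E1"]
    else if coord == ((4 : Int), (2 : Int)) then converted_path ++ ["E3"]
    else if coord == ((4 : Int), (3 : Int)) then converted_path ++ ["E4"]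
    else if coord == ((4 : Int), (4 : Int)) then converted_path ++ ["E5"]
    else converted_path) []

-- ===== PORT B =====
-- the set _VALID of Source B: the 5x5 grid comprehension minus the 5 holes (PySem.Set = distinct-element list)
def pvValid : PySem.Set (Int × Int) :=
  PySem.Set.ofList
    (((PySem.List.pyRange 0 5 1).flatMap fun x =>
        (PySem.List.pyRange 0 5 1).map fun y => (x, y)).filter
      (fun c => !((c == ((1:Int),(2:Int))) || (c == ((3:Int),(0:Int))) || (c == ((3:Int),(2:Int)))
                  || (c == ((3:Int),(3:Int))) || (c == ((4:Int),(1:Int))))))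

-- chr(ord('A') + c[0]) + str(c[1] + 1); only applied to filtered (in-range) coordinates
def pvLabel (c : Int × Int) : String :=
  String.ofList [Char.ofNat (65 + c.1).toNat] ++ PySem.Int.toStr (c.2 + 1)

def coordinate_converter_alt (path : List (Int × Int)) : List String :=
  (path.filter (fun c => pvValid.contains c)).map pvLabel

-- ===== PRECONDITION & SPEC =====
def Spec_coordinate_converter (path : List (Int × Int)) (out : List String) : Prop := out = coordinate_converter_alt path
instance (path : List (Int × Int)) (out : List String) : Decidable (Spec_coordinate_converter path out) := by unfold Spec_coordinate_converter; infer_instance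

-- ===== CLAIM (what is proved, stated in full; the proofs are below) =====
def Claim_equal_coordinate_converter : Prop := ∀ (path : List (Int × Int)), Dom_coordinate_converter path → Spec_coordinate_converter path (coordinate_converter path)

-- ===== LEMMAS AND PROOFS =====


-- pvValid evaluated: exactly the 20 coordinates of A's branch table
theorem pv_valid_eval : pvValid =
    [((0:Int),(0:Int)),(0,1),(0,2),(0,3),(0,4),(1,0),(1,1),(1,3),(1,4),
     (2,0),(2,1),(2,2),(2,3),(2,4),(3,1),(3,4),(4,0),(4,2),(4,3),(4,4)] := by decide

-- membership in pvValid, as a disjunction over the 20 accepted coordinates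
theorem pv_contains_iff (c : Int × Int) : pvValid.contains c = true ↔
    (c = (0,0) ∨ c = (0,1) ∨ c = (0,2) ∨ c = (0,3) ∨ c = (0,4) ∨ c = (1,0) ∨ c = (1,1) ∨
     c = (1,3) ∨ c = (1,4) ∨ c = (2,0) ∨ c = (2,1) ∨ c = (2,2) ∨ c = (2,3) ∨ c = (2,4) ∨
     c = (3,1) ∨ c = (3,4) ∨ c = (4,0) ∨ c = (4,2) ∨ c = (4,3) ∨ c = (4,4)) := by
  rw [pv_valid_eval]
  simp [PySem.Set.contains]

-- one step of A's loop = 'if accepted then append the formula label'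
theorem pv_step_eq (acc : List String) (c : Int × Int) :
    (if c == ((0 : Int), (0 : Int)) then acc ++ ["A1"]
    else if c == ((0 : Int), (1 : Int)) then acc ++ ["A2"]
    else if c == ((0 : Int), (2 : Int)) then acc ++ ["A3"]
    else if c == ((0 : Int), (3 : Int)) then acc ++ ["A4"]
    else if c == ((0 : Int), (4 : Int)) then acc ++ ["A5"]
    else if c == ((1 : Int), (0 : Int)) then acc ++ ["B1"]
    else if c == ((1 : Int), (1 : Int)) then acc ++ ["B2"]
    else if c == ((1 : Int), (3 : Int)) then acc ++ ["B4"]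
    else if c == ((1 : Int), (4 : Int)) then acc ++ ["B5"]
    else if c == ((2 : Int), (0 : Int)) then acc ++ ["C1"]
    else if c == ((2 : Int), (1 : Int)) then acc ++ ["C2"]
    else if c == ((2 : Int), (2 : Int)) then acc ++ ["C3"]
    else if c == ((2 : Int), (3 : Int)) then acc ++ ["C4"]
    else if c == ((2 : Int), (4 : Int)) then acc ++ ["C5"]
    else if c == ((3 : Int), (1 : Int)) then acc ++ ["D2"]
    else if c == ((3 : Int), (4 : Int)) then acc ++ ["D5"]
    else if c == ((4 : Int), (0 : Int)) then acc ++ ["E1"]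
    else if c == ((4 : Int), (2 : Int)) then acc ++ ["E3"]
    else if c == ((4 : Int), (3 : Int)) then acc ++ ["E4"]
    else if c == ((4 : Int), (4 : Int)) then acc ++ ["E5"]
    else acc)
    = (if pvValid.contains c then acc ++ [pvLabel c] else acc) := by
  obtain ⟨x, y⟩ := c
  simp only [beq_iff_eq]
  by_cases h1 : ((x, y) : Int × Int) = (0, 0)
  · rw [Prod.mk.injEq] at h1
    obtain ⟨rfl, rfl⟩ := h1
    rw [if_pos rfl, if_pos (by decide)]
    congr 1
  rw [if_neg h1]
  by_cases h2 : ((x, y) : Int × Int) = (0, 1)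
  · rw [Prod.mk.injEq] at h2
    obtain ⟨rfl, rfl⟩ := h2
    rw [if_pos rfl, if_pos (by decide)]
    congr 1
  rw [if_neg h2]
  by_cases h3 : ((x, y) : Int × Int) = (0, 2)
  · rw [Prod.mk.injEq] at h3
    obtain ⟨rfl, rfl⟩ := h3
    rw [if_pos rfl, if_pos (by decide)]
    congr 1
  rw [if_neg h3]
  by_cases h4 : ((x, y) : Int × Int) = (0, 3)
  · rw [Prod.mk.injEq] at h4
    obtain ⟨rfl, rfl⟩ := h4
    rw [if_pos rfl, if_pos (by decide)]
    congr 1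
  rw [if_neg h4]
  by_cases h5 : ((x, y) : Int × Int) = (0, 4)
  · rw [Prod.mk.injEq] at h5
    obtain ⟨rfl, rfl⟩ := h5
    rw [if_pos rfl, if_pos (by decide)]
    congr 1
  rw [if_neg h5]
  by_cases h6 : ((x, y) : Int × Int) = (1, 0)
  · rw [Prod.mk.injEq] at h6
    obtain ⟨rfl, rfl⟩ := h6
    rw [if_pos rfl, if_pos (by decide)]
    congr 1
  rw [if_neg h6]
  by_cases h7 : ((x, y) : Int × Int) = (1, 1)
  · rw [Prod.mk.injEq] at h7
    obtain ⟨rfl, rfl⟩ := h7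
    rw [if_pos rfl, if_pos (by decide)]
    congr 1
  rw [if_neg h7]
  by_cases h8 : ((x, y) : Int × Int) = (1, 3)
  · rw [Prod.mk.injEq] at h8
    obtain ⟨rfl, rfl⟩ := h8
    rw [if_pos rfl, if_pos (by decide)]
    congr 1
  rw [if_neg h8]
  by_cases h9 : ((x, y) : Int × Int) = (1, 4)
  · rw [Prod.mk.injEq] at h9
    obtain ⟨rfl, rfl⟩ := h9
    rw [if_pos rfl, if_pos (by decide)]
    congr 1
  rw [if_neg h9]
  by_cases h10 : ((x, y) : Int × Int) = (2, 0)
  · rw [Prod.mk.injEq] at h10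
    obtain ⟨rfl, rfl⟩ := h10
    rw [if_pos rfl, if_pos (by decide)]
    congr 1
  rw [if_neg h10]
  by_cases h11 : ((x, y) : Int × Int) = (2, 1)
  · rw [Prod.mk.injEq] at h11
    obtain ⟨rfl, rfl⟩ := h11
    rw [if_pos rfl, if_pos (by decide)]
    congr 1
  rw [if_neg h11]
  by_cases h12 : ((x, y) : Int × Int) = (2, 2)
  · rw [Prod.mk.injEq] at h12
    obtain ⟨rfl, rfl⟩ := h12
    rw [if_pos rfl, if_pos (by decide)]
    congr 1
  rw [if_neg h12]
  by_cases h13 : ((x, y) : Int × Int) = (2, 3)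
  · rw [Prod.mk.injEq] at h13
    obtain ⟨rfl, rfl⟩ := h13
    rw [if_pos rfl, if_pos (by decide)]
    congr 1
  rw [if_neg h13]
  by_cases h14 : ((x, y) : Int × Int) = (2, 4)
  · rw [Prod.mk.injEq] at h14
    obtain ⟨rfl, rfl⟩ := h14
    rw [if_pos rfl, if_pos (by decide)]
    congr 1
  rw [if_neg h14]
  by_cases h15 : ((x, y) : Int × Int) = (3, 1)
  · rw [Prod.mk.injEq] at h15
    obtain ⟨rfl, rfl⟩ := h15
    rw [if_pos rfl, if_pos (by decide)]
    congr 1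
  rw [if_neg h15]
  by_cases h16 : ((x, y) : Int × Int) = (3, 4)
  · rw [Prod.mk.injEq] at h16
    obtain ⟨rfl, rfl⟩ := h16
    rw [if_pos rfl, if_pos (by decide)]
    congr 1
  rw [if_neg h16]
  by_cases h17 : ((x, y) : Int × Int) = (4, 0)
  · rw [Prod.mk.injEq] at h17
    obtain ⟨rfl, rfl⟩ := h17
    rw [if_pos rfl, if_pos (by decide)]
    congr 1
  rw [if_neg h17]
  by_cases h18 : ((x, y) : Int × Int) = (4, 2)
  · rw [Prod.mk.injEq] at h18
    obtain ⟨rfl, rfl⟩ := h18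
    rw [if_pos rfl, if_pos (by decide)]
    congr 1
  rw [if_neg h18]
  by_cases h19 : ((x, y) : Int × Int) = (4, 3)
  · rw [Prod.mk.injEq] at h19
    obtain ⟨rfl, rfl⟩ := h19
    rw [if_pos rfl, if_pos (by decide)]
    congr 1
  rw [if_neg h19]
  by_cases h20 : ((x, y) : Int × Int) = (4, 4)
  · rw [Prod.mk.injEq] at h20
    obtain ⟨rfl, rfl⟩ := h20
    rw [if_pos rfl, if_pos (by decide)]
    congr 1
  rw [if_neg h20]
  rw [if_neg (fun hmem => by
    rw [pv_contains_iff] at hmem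
    tauto)]

-- ===== VERDICT (by name: the statement is the Claim_ definition above) =====
theorem coordinate_converter_spec : Claim_equal_coordinate_converter := by
  intro path _
  unfold Spec_coordinate_converter coordinate_converter coordinate_converter_alt
  rw [PySem.List.foldl_congr_mem _ _ (fun acc c => if pvValid.contains c then acc ++ [pvLabel c] else acc) _ (fun acc c _ => pv_step_eq acc c),
      PySem.List.foldl_append_if, List.nil_append]
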